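-- pv_equiv track=rewrite | github.com/naman2003now/SnakeGame-Ai | SnakeGamePathFinding.py | trackPath
-- ===== SOURCE A (Python) =====
-- def trackPath(path, point):
--     for char in path:
--         if char == "R":
--             point = (point[0], point[1] + 1)
--         if char == "L":
--             point = (point[0], point[1] - 1)
--         if char == "U":
--             point = (point[0] - 1, point[1])
--         if char == "D":
--             point = (point[0] + 1, point[1])
--
--     return point
-- ===== SOURCE B (Python) =====
-- def trackPath(path, point):
--     dRow = path.count("D") - path.count("U")
--     dCol = path.count("R") - path.count("L")
--     return (point[0] + dRow, point[1] + dCol)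
-- ===== Notes on version B (the rewrite author's own statement) =====
-- stated objective: faster
-- what changed: B replaces the per-character state-update loop by a closed-form net-displacement tally: row delta = count('D')-count('U'), column delta = count('R')-count('L'), added to the point once.
import Mathlib
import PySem

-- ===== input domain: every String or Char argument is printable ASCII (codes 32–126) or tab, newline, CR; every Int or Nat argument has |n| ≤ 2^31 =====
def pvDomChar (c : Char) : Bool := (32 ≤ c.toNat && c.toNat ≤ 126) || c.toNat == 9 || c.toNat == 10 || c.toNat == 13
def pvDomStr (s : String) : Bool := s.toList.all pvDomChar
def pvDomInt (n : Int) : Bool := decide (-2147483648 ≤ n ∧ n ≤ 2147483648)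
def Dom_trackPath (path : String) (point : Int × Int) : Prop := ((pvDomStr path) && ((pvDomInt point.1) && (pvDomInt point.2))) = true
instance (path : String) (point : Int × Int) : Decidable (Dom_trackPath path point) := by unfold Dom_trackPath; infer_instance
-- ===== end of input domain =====

-- B replaces A's per-character state-update loop by a closed-form net-displacement
-- tally (counts of 'D','U','R','L'); objective: simpler.

-- ===== PORT A =====
def trackPath (path : String) (point : Int × Int) : Int × Int :=
  path.toList.foldl
    (fun point char =>
      let point := if char == 'R' then (point.1, point.2 + 1) else point
      let point := if char == 'L' then (point.1, point.2 - 1) else point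
      let point := if char == 'U' then (point.1 - 1, point.2) else point
      if char == 'D' then (point.1 + 1, point.2) else point)
    point

-- ===== PORT B =====
def trackPath_alt (path : String) (point : Int × Int) : Int × Int :=
  let dRow : Int := (PySem.Str.count path "D" : Int) - (PySem.Str.count path "U" : Int)
  let dCol : Int := (PySem.Str.count path "R" : Int) - (PySem.Str.count path "L" : Int)
  (point.1 + dRow, point.2 + dCol)

-- ===== PRECONDITION & SPEC =====
def Spec_trackPath (path : String) (point : Int × Int) (out : Int × Int) : Prop := out = trackPath_alt path point
instance (path : String) (point : Int × Int) (out : Int × Int) : Decidable (Spec_trackPath path point out) := by unfold Spec_trackPath; infer_instance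

-- ===== CLAIM (what is proved, stated in full; the proofs are below) =====
def Claim_equal_trackPath : Prop := ∀ (path : String) (point : Int × Int), Dom_trackPath path point → Spec_trackPath path point (trackPath path point)

-- ===== LEMMAS AND PROOFS =====

-- Python str.count with a single-character needle is List.count on the characters.
theorem chars_count_go_singleton (c : Char) (l : List Char) (fuel acc : Nat)
    (h : l.length ≤ fuel) :
    PySem.Chars.count.go [c] fuel l acc = acc + l.count c := by
  induction l generalizing fuel acc with
  | nil =>
    cases fuel <;> simp [PySem.Chars.count.go]
  | cons hd t ih =>
    cases fuel with
    | zero => simp at h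
    | succ n =>
      simp only [List.length_cons, Nat.succ_le_succ_iff] at h
      by_cases hc : hd = c
      · subst hc
        simp [PySem.Chars.count.go, List.isPrefixOf, List.count_cons, ih t.length acc (le_refl _),
          ih n (acc+1) h]
        omega
      · have : ([c].isPrefixOf (hd :: t)) = false := by
          simp [List.isPrefixOf]
          exact fun he => (hc he.symm).elim
        simp [PySem.Chars.count.go, this, List.count_cons, hc, ih n acc h]

theorem str_count_singleton (s : String) (c : Char) :
    PySem.Str.count s (String.ofList [c]) = s.toList.count c := by
  have h : (String.ofList [c]).toList = [c] := by simp
  simp only [PySem.Str.count, PySem.Chars.count, h, List.isEmpty, if_neg]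
  simpa using chars_count_go_singleton c s.toList s.length 0 (by simp)

theorem foldl_moves (l : List Char) (p : Int × Int) :
    l.foldl
      (fun point char =>
        let point := if char == 'R' then (point.1, point.2 + 1) else point
        let point := if char == 'L' then (point.1, point.2 - 1) else point
        let point := if char == 'U' then (point.1 - 1, point.2) else point
        if char == 'D' then (point.1 + 1, point.2) else point)
      p
    = (p.1 + ((l.count 'D' : Int) - (l.count 'U' : Int)),
       p.2 + ((l.count 'R' : Int) - (l.count 'L' : Int))) := by
  induction l generalizing p with
  | nil => simp
  | cons hd t ih =>
    simp only [List.foldl_cons, List.count_cons, ih]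
    split_ifs <;> simp_all [Prod.ext_iff] <;> push_cast <;> omega

-- ===== VERDICT (by name: the statement is the Claim_ definition above) =====
theorem trackPath_spec : Claim_equal_trackPath := by
  intro path point _
  show trackPath path point = trackPath_alt path point
  unfold trackPath trackPath_alt
  rw [foldl_moves]
  simp only [show ("D" : String) = String.ofList ['D'] from rfl,
    show ("U" : String) = String.ofList ['U'] from rfl,
    show ("R" : String) = String.ofList ['R'] from rfl,
    show ("L" : String) = String.ofList ['L'] from rfl,
    str_count_singleton]
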